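-- pv_equiv track=rewrite | github.com/ckoons/BubbleSpacetimeTheory | play/toy_self_duality_rh.py | _chern_coefficients
-- ===== SOURCE A (Python) =====
-- from math import comb, factorial
--
-- def _chern_coefficients(n):
--     """
--     Compute Chern class coefficients c_1, ..., c_n for Q^n.
--     c(Q^n) = (1+h)^(n+2) / (1+2h) mod h^(n+1)
--     """
--     coeffs = []
--     for k in range(1, n + 1):
--         ck = 0
--         for j in range(k + 1):
--             ck += comb(n + 2, k - j) * ((-2) ** j)
--         coeffs.append(ck)
--     return coeffs
-- ===== SOURCE B (Python) =====
-- from math import comb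
--
-- def _chern_coefficients(n):
--     """
--     Compute Chern class coefficients c_1, ..., c_n for Q^n.
--     c(Q^n) = (1+h)^(n+2) / (1+2h) mod h^(n+1)
--     Uses the linear recurrence c_k = comb(n+2, k) - 2*c_{k-1}, c_0 = 1,
--     so only one comb call per coefficient.
--     """
--     coeffs = []
--     prev = 1
--     for k in range(1, n + 1):
--         prev = comb(n + 2, k) - 2 * prev
--         coeffs.append(prev)
--     return coeffs
-- ===== Notes on version B (the rewrite author's own statement) =====
-- stated objective: faster
-- what changed: Replaces the O(k) inner binomial sum for each coefficient by the linear recurrence c_k = comb(n+2,k) - 2*c_{k-1} with c_0 = 1, one comb call per coefficient.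
import Mathlib
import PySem

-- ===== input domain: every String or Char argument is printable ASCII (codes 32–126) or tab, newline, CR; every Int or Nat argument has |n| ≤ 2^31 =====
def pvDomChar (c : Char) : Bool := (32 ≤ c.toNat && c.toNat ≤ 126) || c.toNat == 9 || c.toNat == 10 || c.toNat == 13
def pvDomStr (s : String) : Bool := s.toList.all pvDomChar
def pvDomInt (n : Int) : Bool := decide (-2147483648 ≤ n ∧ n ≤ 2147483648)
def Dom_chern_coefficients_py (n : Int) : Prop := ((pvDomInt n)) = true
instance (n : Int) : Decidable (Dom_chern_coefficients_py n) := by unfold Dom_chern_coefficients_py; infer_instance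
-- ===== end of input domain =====

-- B replaces A's inner binomial sum per coefficient by the linear recurrence
-- c_k = comb(n+2,k) - 2*c_{k-1}, c_0 = 1 (one comb call per coefficient).

-- hand ports of library arithmetic, shared by both sides:
-- pyDescFac a k = a*(a-1)*...*(a-k+1); pyComb a b = math.comb(a, b), exact for
-- 0 ≤ a and 0 ≤ b (which holds at every call either program makes)
def pyDescFac (a : Nat) : Nat → Nat
  | 0 => 1
  | k + 1 => (a - k) * pyDescFac a k
def pyFac : Nat → Nat
  | 0 => 1
  | k + 1 => (k + 1) * pyFac k
def pyComb (a b : Int) : Int := ((pyDescFac a.toNat b.toNat / pyFac b.toNat : Nat) : Int)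
-- pyPow b e = b ** e, exact for exponent e ≥ 0 (the only exponents used: j ranges over 0..k)
def pyPow (b : Int) : Nat → Int
  | 0 => 1
  | e + 1 => b * pyPow b e

-- ===== PORT A =====
def chern_coefficients_py (n : Int) : List Int :=
  (PySem.List.pyRange 1 (n + 1) 1).foldl
    (fun coeffs k =>
      coeffs ++ [(PySem.List.pyRange 0 (k + 1) 1).foldl
        (fun ck j => ck + pyComb (n + 2) (k - j) * pyPow (-2) j.toNat) 0])
    []

-- ===== PORT B =====
def chern_coefficients_py_alt (n : Int) : List Int :=
  ((PySem.List.pyRange 1 (n + 1) 1).foldl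
    (fun (st : List Int × Int) k =>
      let p := pyComb (n + 2) k - 2 * st.2
      (st.1 ++ [p], p))
    (([] : List Int), (1 : Int))).1

-- ===== PRECONDITION & SPEC =====
def Spec_chern_coefficients_py (n : Int) (out : List Int) : Prop := out = chern_coefficients_py_alt n
instance (n : Int) (out : List Int) : Decidable (Spec_chern_coefficients_py n out) := by unfold Spec_chern_coefficients_py; infer_instance

-- ===== CLAIM (what is proved, stated in full; the proofs are below) =====
def Claim_equal_chern_coefficients_py : Prop := ∀ (n : Int), Dom_chern_coefficients_py n → Spec_chern_coefficients_py n (chern_coefficients_py n)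

-- ===== LEMMAS AND PROOFS =====

-- the recurrence value c_k (B's `prev` after step k)
def chS (n : Int) : Nat → Int
  | 0 => 1
  | k + 1 => pyComb (n + 2) ((k : Int) + 1) - 2 * chS n k

-- A's inner sum as a Nat-indexed list sum
def chT (n : Int) (k : Nat) : Int :=
  ((List.range (k + 1)).map (fun (j : Nat) => pyComb (n + 2) ((k : Int) - (j : Int)) * pyPow (-2) j)).sum

lemma pyPow_succ (b : Int) (e : Nat) : pyPow b (e + 1) = b * pyPow b e := rfl

lemma chT_succ (n : Int) (k : Nat) :
    chT n (k + 1) = pyComb (n + 2) ((k : Int) + 1) + (-2) * chT n k := by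
  unfold chT
  rw [List.range_succ_eq_map, List.map_cons, List.map_map, List.sum_cons]
  congr 1
  · push_cast
    simp [pyPow]
  · rw [← List.sum_map_mul_left]
    apply congrArg List.sum
    apply List.map_congr_left
    intro j hj
    have h1 : (((k + 1 : Nat)) : Int) - ((Nat.succ j : Nat) : Int) = (k : Int) - (j : Int) := by
      push_cast; ring
    simp only [Function.comp_apply, h1, Nat.succ_eq_add_one, pyPow_succ]
    ring

lemma chT_eq_chS (n : Int) : ∀ k, chT n k = chS n k := by
  intro k
  induction k with
  | zero => simp [chT, chS, pyComb, pyDescFac, pyFac, pyPow]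
  | succ k ih =>
    rw [chT_succ, ih, chS]
    ring

-- A's inner fold equals chS
lemma inner_eq_chS (n : Int) (k : Nat) :
    (PySem.List.pyRange 0 ((k : Int) + 1) 1).foldl
      (fun ck j => ck + pyComb (n + 2) ((k : Int) - j) * pyPow (-2) j.toNat) 0 = chS n k := by
  have h1 : ((k : Int) + 1) = ((k + 1 : Nat) : Int) := by push_cast; ring
  rw [h1, PySem.List.pyRange_zero_natCast, PySem.List.foldl_add, ← chT_eq_chS n k, chT]
  simp [List.map_map, Function.comp_def]

-- joint invariant over the outer loop prefix [1..m]
lemma outer_inv (n : Int) : ∀ m : Nat,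
    (PySem.List.pyRange 1 ((m : Int) + 1) 1).foldl
      (fun coeffs k =>
        coeffs ++ [(PySem.List.pyRange 0 (k + 1) 1).foldl
          (fun ck j => ck + pyComb (n + 2) (k - j) * pyPow (-2) j.toNat) 0])
      []
      = (List.range m).map (fun i => chS n (i + 1))
    ∧ (PySem.List.pyRange 1 ((m : Int) + 1) 1).foldl
      (fun (st : List Int × Int) k =>
        let p := pyComb (n + 2) k - 2 * st.2
        (st.1 ++ [p], p))
      (([] : List Int), (1 : Int))
      = ((List.range m).map (fun i => chS n (i + 1)), chS n m) := by
  intro m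
  induction m with
  | zero =>
    constructor <;> rfl
  | succ m ih =>
    have hr : PySem.List.pyRange 1 (((m + 1 : Nat) : Int) + 1) 1
        = PySem.List.pyRange 1 ((m : Int) + 1) 1 ++ [(m : Int) + 1] := by
      have h1 : (((m + 1 : Nat) : Int) + 1) = ((m : Int) + 1) + 1 := by push_cast; ring
      rw [h1, PySem.List.pyRange_one_succ_right (by omega)]
    refine ⟨?_, ?_⟩
    · rw [hr, List.foldl_append, ih.1]
      have h2 := inner_eq_chS n (m + 1)
      rw [show (((m + 1 : Nat) : Int)) = (m : Int) + 1 by push_cast; ring] at h2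
      simp [List.range_succ, h2]
    · rw [hr, List.foldl_append, ih.2]
      simp [chS, List.range_succ]

lemma pyRange_nil_of_le (n : Int) (h : n < 1) : PySem.List.pyRange 1 (n + 1) 1 = [] := by
  simp [PySem.List.pyRange]; omega

-- ===== VERDICT (by name: the statement is the Claim_ definition above) =====
theorem chern_coefficients_py_spec : Claim_equal_chern_coefficients_py := by
  intro n _
  unfold Spec_chern_coefficients_py chern_coefficients_py chern_coefficients_py_alt
  by_cases h : n < 1
  · rw [pyRange_nil_of_le n h]
    rfl
  · have hn : n + 1 = ((n.toNat : Int) + 1) := by omega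
    rw [hn, (outer_inv n n.toNat).1, (outer_inv n n.toNat).2]
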